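-- pv_equiv track=rewrite | github.com/AdaMartin18010/formal-framework | tools/dsl_compiler.py | remove_unused_imports
-- ===== SOURCE A (Python) =====
-- def remove_unused_imports(code: str) -> str:
--     """移除未使用的导入"""
--     lines = code.split('\n')
--     result = []
--     imports = []
--
--     for line in lines:
--         if line.strip().startswith('import ') or line.strip().startswith('from '):
--             imports.append(line)
--         else:
--             result.append(line)
--
--     # 简单检查：如果代码中没有使用导入的内容，则移除
--     # 这里可以实现更复杂的分析
--     if result:
--         return '\n'.join(imports + result)
--     return code
-- ===== SOURCE B (Python) =====
-- def remove_unused_imports(code: str) -> str: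
--     """移除未使用的导入"""
--     def is_import(line):
--         s = line.strip()
--         return s.startswith('import ') or s.startswith('from ')
--     return '\n'.join(sorted(code.split('\n'), key=lambda l: not is_import(l)))
-- ===== Notes on version B (the rewrite author's own statement) =====
-- stated objective: simpler
-- what changed: Replaces A's manual two-accumulator partition loop and its empty-result special case with a single stable sort of the split lines on a boolean not-import key followed by one join.
import Mathlib
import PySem

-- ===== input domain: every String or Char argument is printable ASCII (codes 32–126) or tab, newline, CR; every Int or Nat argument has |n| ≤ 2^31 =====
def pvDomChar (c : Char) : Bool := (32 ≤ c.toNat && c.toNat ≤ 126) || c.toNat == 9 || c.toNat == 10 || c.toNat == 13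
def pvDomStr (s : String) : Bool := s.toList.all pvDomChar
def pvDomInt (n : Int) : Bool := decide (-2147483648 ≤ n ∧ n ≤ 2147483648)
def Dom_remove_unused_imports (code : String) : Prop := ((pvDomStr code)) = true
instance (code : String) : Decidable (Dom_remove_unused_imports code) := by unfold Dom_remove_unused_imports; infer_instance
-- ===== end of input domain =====

-- B replaces A's manual two-list partition and its empty-result special case by a single
-- stable sort on a boolean key (objective: simpler); same return value on every input.

-- ===== PORT A =====
def remove_unused_imports (code : String) : String :=
  let lines := (PySem.Str.split? code "\n").getD []
  let st := lines.foldl (fun (acc : List String × List String) line =>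
    if PySem.Str.startswith (PySem.Str.strip line) "import "
        || PySem.Str.startswith (PySem.Str.strip line) "from " then
      (acc.1, acc.2 ++ [line])
    else
      (acc.1 ++ [line], acc.2)) ([], [])
  if st.1 ≠ [] then PySem.Str.join "\n" (st.2 ++ st.1) else code

-- ===== PORT B =====
def isImportLine (line : String) : Bool :=
  PySem.Str.startswith (PySem.Str.strip line) "import "
    || PySem.Str.startswith (PySem.Str.strip line) "from "

def remove_unused_imports_alt (code : String) : String :=
  PySem.Str.join "\n"
    (PySem.List.sorted ((PySem.Str.split? code "\n").getD []) (fun l => !isImportLine l) false)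

-- ===== PRECONDITION & SPEC =====
def Spec_remove_unused_imports (code : String) (out : String) : Prop := out = remove_unused_imports_alt code
instance (code : String) (out : String) : Decidable (Spec_remove_unused_imports code out) := by unfold Spec_remove_unused_imports; infer_instance

-- ===== CLAIM (what is proved, stated in full; the proofs are below) =====
def Claim_equal_remove_unused_imports : Prop := ∀ (code : String), Dom_remove_unused_imports code → Spec_remove_unused_imports code (remove_unused_imports code)

-- ===== LEMMAS AND PROOFS =====

-- join of a list with one more part at the end
theorem join_append_singleton (sep : List Char) :
    ∀ (xs : List (List Char)) (y : List Char), xs ≠ [] →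
      PySem.Chars.join sep (xs ++ [y]) = PySem.Chars.join sep xs ++ sep ++ y
  | [], _, h => absurd rfl h
  | [a], y, _ => by
      simp [PySem.Chars.join_cons_cons, PySem.Chars.join_singleton]
  | a :: b :: xs, y, _ => by
      have ih := join_append_singleton sep (b :: xs) y (by simp)
      have h1 : (a :: b :: xs) ++ [y] = a :: ((b :: xs) ++ [y]) := by simp
      have h2 : ((b :: xs) ++ [y] : List (List Char)) = b :: (xs ++ [y]) := by simp
      rw [h1, h2, PySem.Chars.join_cons_cons, ← h2, ih, PySem.Chars.join_cons_cons]
      simp [List.append_assoc]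

-- the splitOn worker, rejoined, restores its input
theorem join_go (sep : List Char) (hsep : sep ≠ []) :
    ∀ (fuel : Nat) (l cur : List Char) (acc : List (List Char)), l.length < fuel →
      PySem.Chars.join sep (PySem.Chars.splitOn.go sep fuel l cur acc)
        = PySem.Chars.join sep ((cur.reverse :: acc).reverse) ++ l := by
  intro fuel
  induction fuel with
  | zero => intro l cur acc h; omega
  | succ fuel ih =>
    intro l cur acc h
    cases l with
    | nil =>
      simp [PySem.Chars.splitOn.go]
    | cons c rest =>
      by_cases hp : sep.isPrefixOf (c :: rest) = true
      · simp only [PySem.Chars.splitOn.go, hp, if_true]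
        obtain ⟨t, ht⟩ := (List.isPrefixOf_iff_prefix.mp hp)
        have hdrop : (c :: rest).drop sep.length = t := by
          rw [← ht]; simp
        have hlen : ((c :: rest).drop sep.length).length < fuel := by
          have h0 : 0 < sep.length := List.length_pos_of_ne_nil hsep
          simp only [List.length_drop, List.length_cons] at *
          omega
        rw [ih _ _ _ hlen, hdrop]
        have hne : (cur.reverse :: acc).reverse ≠ [] := by simp
        have : ((([] : List Char).reverse :: cur.reverse :: acc).reverse)
            = (cur.reverse :: acc).reverse ++ [[]] := by simp
        rw [this, join_append_singleton sep _ _ hne]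
        rw [← ht]
        simp [List.append_assoc]
      · simp only [PySem.Chars.splitOn.go, hp]
        rw [if_neg (by simp)]
        have hlen : rest.length < fuel := by simp at h; omega
        rw [ih _ _ _ hlen]
        have hrev : ((c :: cur).reverse : List Char) = cur.reverse ++ [c] := by simp
        cases acc with
        | nil =>
          simp [hrev, PySem.Chars.join_singleton]
        | cons a as =>
          have hne : ((a :: as).reverse : List (List Char)) ≠ [] := by simp
          have h1 : ((cur.reverse ++ [c]) :: a :: as).reverse
              = (a :: as).reverse ++ [cur.reverse ++ [c]] := by simp
          have h2 : ((cur.reverse : List Char) :: a :: as).reverse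
              = (a :: as).reverse ++ [cur.reverse] := by simp
          rw [hrev, h1, h2, join_append_singleton sep _ _ hne, join_append_singleton sep _ _ hne]
          simp [List.append_assoc]

theorem join_splitOn (sep cs : List Char) (hsep : sep ≠ []) :
    PySem.Chars.join sep (PySem.Chars.splitOn cs sep) = cs := by
  have := join_go sep hsep (cs.length + 1) cs [] [] (by omega)
  simpa [PySem.Chars.splitOn, PySem.Chars.join_singleton] using this

-- '\n'.join(code.split('\n')) == code, at the String level
theorem join_split_str (code : String) :
    PySem.Str.join "\n" ((PySem.Str.split? code "\n").getD []) = code := by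
  have hmap := PySem.Str.split?_map code "\n"
  have hsep : (("\n" : String).toList : List Char) ≠ [] := by decide
  rw [PySem.Chars.split?] at hmap
  rw [if_neg (by decide)] at hmap
  obtain ⟨parts, hparts, hmapped⟩ := Option.map_eq_some_iff.mp hmap
  apply String.toList_inj.mp
  rw [hparts]
  simp only [Option.getD_some]
  rw [PySem.Str.toList_join, hmapped]
  exact join_splitOn _ _ hsep

-- inserting into a false-block ++ true-block list (two-valued key, stable position)
theorem insertBy_partition {α : Type} (q : α → Bool) (x : α) :
    ∀ (F T : List α), (∀ f ∈ F, q f = false) → (∀ t ∈ T, q t = true) →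
      PySem.List.insertBy (fun a b => decide (q a < q b)) x (F ++ T)
        = if q x then F ++ (T ++ [x]) else F ++ (x :: T)
  | [], [], _, _ => by cases hx : q x <;> simp [PySem.List.insertBy]
  | [], t :: T, _, hT => by
      have ht : q t = true := hT t (by simp)
      cases hx : q x with
      | false => simp [PySem.List.insertBy, ht, hx]
      | true =>
        have ih := insertBy_partition q x [] T (by simp) (fun u hu => hT u (by simp [hu]))
        simp only [List.nil_append] at ih
        simp [PySem.List.insertBy, ht, hx, ih]
  | f :: F, T, hF, hT => by
      have hf : q f = false := hF f (by simp)
      have ih := insertBy_partition q x F T (fun u hu => hF u (by simp [hu])) hT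
      cases hx : q x <;>
        simp_all [PySem.List.insertBy]

-- stable sort on a boolean key is the stable partition
theorem foldl_insert_partition {α : Type} (q : α → Bool) :
    ∀ (xs F T : List α), (∀ f ∈ F, q f = false) → (∀ t ∈ T, q t = true) →
      xs.foldl (fun acc x => PySem.List.insertBy (fun a b => decide (q a < q b)) x acc) (F ++ T)
        = (F ++ xs.filter (fun x => !q x)) ++ (T ++ xs.filter q)
  | [], F, T, _, _ => by simp
  | x :: xs, F, T, hF, hT => by
      simp only [List.foldl_cons]
      rw [insertBy_partition q x F T hF hT]
      cases hx : q x with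
      | true =>
        rw [if_pos rfl]
        rw [foldl_insert_partition q xs F (T ++ [x]) hF
          (by intro u hu; rcases List.mem_append.mp hu with h | h
              · exact hT u h
              · simp at h; subst h; exact hx)]
        simp [hx, List.append_assoc]
      | false =>
        rw [if_neg (by decide)]
        rw [show F ++ (x :: T) = (F ++ [x]) ++ T by simp]
        rw [foldl_insert_partition q xs (F ++ [x]) T
          (by intro u hu; rcases List.mem_append.mp hu with h | h
              · exact hF u h
              · simp at h; subst h; exact hx) hT]
        simp [hx, List.append_assoc]

theorem sorted_two_valued {α : Type} (q : α → Bool) (xs : List α) :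
    PySem.List.sorted xs q false = xs.filter (fun x => !q x) ++ xs.filter q := by
  rw [PySem.List.sorted_eq_foldl_insertBy]
  have := foldl_insert_partition q xs [] [] (by simp) (by simp)
  simpa using this

-- A's accumulator pair, characterised as two filters
theorem foldl_pair :
    ∀ (ls : List String) (res imps : List String),
      ls.foldl (fun (acc : List String × List String) line =>
        if PySem.Str.startswith (PySem.Str.strip line) "import "
            || PySem.Str.startswith (PySem.Str.strip line) "from " then
          (acc.1, acc.2 ++ [line])
        else
          (acc.1 ++ [line], acc.2)) (res, imps)
        = (res ++ ls.filter (fun l => !isImportLine l), imps ++ ls.filter isImportLine)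
  | [], res, imps => by simp
  | l :: ls, res, imps => by
      simp only [List.foldl_cons]
      cases hl : isImportLine l with
      | true =>
        have hc : (PySem.Str.startswith (PySem.Str.strip l) "import "
            || PySem.Str.startswith (PySem.Str.strip l) "from ") = true := hl
        rw [if_pos hc, foldl_pair ls res (imps ++ [l])]
        simp [hl]
      | false =>
        have hc : (PySem.Str.startswith (PySem.Str.strip l) "import "
            || PySem.Str.startswith (PySem.Str.strip l) "from ") = false := hl
        rw [if_neg (by rw [hc]; exact Bool.false_ne_true), foldl_pair ls (res ++ [l]) imps]
        simp [hl]

theorem filter_eq_self_of_filter_not_nil {α : Type} (q : α → Bool) (xs : List α)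
    (h : xs.filter (fun x => !q x) = []) : xs.filter q = xs := by
  apply List.filter_eq_self.mpr
  intro x hx
  by_contra hq
  have : x ∈ xs.filter (fun x => !q x) := by
    apply List.mem_filter.mpr
    exact ⟨hx, by simp [Bool.eq_false_iff.mpr hq]⟩
  simp [h] at this

-- ===== VERDICT (by name: the statement is the Claim_ definition above) =====
theorem remove_unused_imports_spec : Claim_equal_remove_unused_imports := by
  intro code _
  unfold Spec_remove_unused_imports remove_unused_imports remove_unused_imports_alt
  simp only []
  set lines : List String := (PySem.Str.split? code "\n").getD [] with hlines
  rw [foldl_pair lines [] []]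
  rw [sorted_two_valued (fun l => !isImportLine l) lines]
  simp only [Bool.not_not, List.nil_append]
  by_cases hres : lines.filter (fun l => !isImportLine l) = []
  · rw [if_neg (by simp [hres])]
    rw [hres, List.append_nil,
      filter_eq_self_of_filter_not_nil isImportLine lines hres]
    exact (join_split_str code).symm
  · rw [if_pos (by simpa using hres)]
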